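-- pv_equiv track=rewrite | github.com/AzurIce/evlib | python/evlib/ecf_integration_demo.py | create_synthetic_prophesee_data
-- ===== SOURCE A (Python) =====
-- def create_synthetic_prophesee_data(num_events=1000):
--     """Create synthetic event data in Prophesee format for testing."""
--
--     # Create realistic event camera data
--     events = []
--
--     # Simulate moving objects creating events
--     time_us = 0
--     for frame_num in range(100):  # 100 time steps
--         for obj_num in range(num_events // 100):
--             # Moving object creating events
--             x = (100 + obj_num * 50 + frame_num * 2) % 1280
--             y = (100 + obj_num * 30 + frame_num) % 720
--             polarity = 1 if (x + y + frame_num) % 2 == 0 else -1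
--
--             events.append({"x": x, "y": y, "p": polarity, "t": time_us})
--
--             time_us += 100  # 100 microsecond intervals
--
--     return events[:num_events]
-- ===== SOURCE B (Python) =====
-- def create_synthetic_prophesee_data(num_events=1000):
--     """Create synthetic event data in Prophesee format for testing."""
--     # Simulation with explicit moving-object state: keep the current (x, y)
--     # position of every object and advance the positions frame by frame,
--     # instead of recomputing each position from (frame, obj) closed forms.
--     positions = [((100 + o * 50) % 1280, (100 + o * 30) % 720)
--                  for o in range(num_events // 100)]
--     events = []
--     for f in range(100):
--         for x, y in positions:
--             events.append({
--                 "x": x,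
--                 "y": y,
--                 "p": 1 if (x + y + f) % 2 == 0 else -1,
--                 "t": len(events) * 100,
--             })
--         positions = [((x + 2) % 1280, (y + 1) % 720) for x, y in positions]
--     return events
-- ===== Notes on version B (the rewrite author's own statement) =====
-- stated objective: alternative
-- what changed: B simulates the scene statefully: it initialises a list of per-object (x,y) positions, emits each frame's events directly from that state and advances every position by (+2,+1) with modular wraparound between frames, with timestamps derived from the event count, instead of A's recomputation of every coordinate from (frame, obj) closed forms with a running time counter and a final slice.
import Mathlib
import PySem

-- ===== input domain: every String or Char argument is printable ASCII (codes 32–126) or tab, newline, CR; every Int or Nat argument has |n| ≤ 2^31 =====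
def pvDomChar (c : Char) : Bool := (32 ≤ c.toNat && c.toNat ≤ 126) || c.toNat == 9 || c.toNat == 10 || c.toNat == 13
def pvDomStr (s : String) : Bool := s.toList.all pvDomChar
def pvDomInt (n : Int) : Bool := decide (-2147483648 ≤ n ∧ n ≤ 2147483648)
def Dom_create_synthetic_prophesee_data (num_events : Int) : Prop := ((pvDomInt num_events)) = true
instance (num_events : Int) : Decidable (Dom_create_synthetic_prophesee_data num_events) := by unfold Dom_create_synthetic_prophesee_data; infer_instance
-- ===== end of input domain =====

-- B simulates the scene statefully (per-object positions advanced frame by frame,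
-- timestamps from the event count) instead of A's closed-form recomputation per
-- (frame, obj) with a running counter and a final slice; objective: alternative.


-- ===== PORT A =====
-- the body of A's inner loop: append one event dict, advance the time counter by 100
def pvStepA (frame_num : Int) (st : List (List (String × Int)) × Int) (obj_num : Int) :
    List (List (String × Int)) × Int :=
  let x := PySem.Int.mod (100 + obj_num * 50 + frame_num * 2) 1280
  let y := PySem.Int.mod (100 + obj_num * 30 + frame_num) 720
  let polarity : Int := if PySem.Int.mod (x + y + frame_num) 2 = 0 then 1 else -1
  (st.1 ++ [[("x", x), ("y", y), ("p", polarity), ("t", st.2)]], st.2 + 100)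

def create_synthetic_prophesee_data (num_events : Int) : List (List (String × Int)) :=
  let st :=
    (PySem.List.pyRange 0 100 1).foldl
      (fun st frame_num =>
        (PySem.List.pyRange 0 (PySem.Int.floordiv num_events 100) 1).foldl
          (pvStepA frame_num) st)
      ([], 0)
  PySem.List.slice st.1 none (some num_events)

-- ===== PORT B =====
-- B's helpers: initial position of object o, one emitted event, one position update
def pvPos0 (o : Int) : Int × Int :=
  (PySem.Int.mod (100 + o * 50) 1280, PySem.Int.mod (100 + o * 30) 720)

def pvEmitB (f : Int) (ev : List (List (String × Int))) (xy : Int × Int) :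
    List (List (String × Int)) :=
  ev ++ [[("x", xy.1), ("y", xy.2),
          ("p", if PySem.Int.mod (xy.1 + xy.2 + f) 2 = 0 then 1 else -1),
          ("t", (ev.length : Int) * 100)]]

def pvAdvance (xy : Int × Int) : Int × Int :=
  (PySem.Int.mod (xy.1 + 2) 1280, PySem.Int.mod (xy.2 + 1) 720)

-- one frame of B: emit an event per current position, then advance all positions
def pvStepB (st : List (List (String × Int)) × List (Int × Int)) (f : Int) :
    List (List (String × Int)) × List (Int × Int) :=
  (st.2.foldl (pvEmitB f) st.1, st.2.map pvAdvance)

def create_synthetic_prophesee_data_alt (num_events : Int) : List (List (String × Int)) :=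
  ((PySem.List.pyRange 0 100 1).foldl pvStepB
      ([], (PySem.List.pyRange 0 (PySem.Int.floordiv num_events 100) 1).map pvPos0)).1

-- ===== PRECONDITION & SPEC =====
def Spec_create_synthetic_prophesee_data (num_events : Int) (out : List (List (String × Int))) : Prop := out = create_synthetic_prophesee_data_alt num_events
instance (num_events : Int) (out : List (List (String × Int))) : Decidable (Spec_create_synthetic_prophesee_data num_events out) := by unfold Spec_create_synthetic_prophesee_data; infer_instance

-- ===== CLAIM (what is proved, stated in full; the proofs are below) =====
def Claim_equal_create_synthetic_prophesee_data : Prop := ∀ (num_events : Int), Dom_create_synthetic_prophesee_data num_events → Spec_create_synthetic_prophesee_data num_events (create_synthetic_prophesee_data num_events)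

-- ===== LEMMAS AND PROOFS =====

-- A's event dict, with the timestamp made explicit
def pvEvA (f o t : Int) : List (String × Int) :=
  let x := PySem.Int.mod (100 + o * 50 + f * 2) 1280
  let y := PySem.Int.mod (100 + o * 30 + f) 720
  [("x", x), ("y", y),
   ("p", if PySem.Int.mod (x + y + f) 2 = 0 then 1 else -1),
   ("t", t)]

-- object o's position at frame f
def pvPosAt (f o : Int) : Int × Int :=
  (PySem.Int.mod (100 + o * 50 + f * 2) 1280, PySem.Int.mod (100 + o * 30 + f) 720)

theorem pvStepA_eq (f : Int) (st : List (List (String × Int)) × Int) (o : Int) :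
    pvStepA f st o = (st.1 ++ [pvEvA f o st.2], st.2 + 100) := rfl

-- A's inner loop: fold over range(0, per) appends per events, advances the counter by 100*per
theorem pv_inner_fold (f : Int) (n : Nat) :
    ∀ (acc : List (List (String × Int))) (t : Int),
      (PySem.List.pyRange 0 (n : Int) 1).foldl (pvStepA f) (acc, t)
        = (acc ++ (PySem.List.pyRange 0 (n : Int) 1).map (fun o => pvEvA f o (t + o * 100)),
           t + n * 100) := by
  induction n with
  | zero => intro acc t; simp [PySem.List.pyRange_one_eq_nil]
  | succ n ih =>
    intro acc t
    rw [show ((n + 1 : Nat) : Int) = (n : Int) + 1 by push_cast; ring,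
        PySem.List.pyRange_one_succ_right (Int.natCast_nonneg n)]
    rw [List.foldl_append, ih, List.map_append]
    simp only [List.foldl_cons, List.foldl_nil, pvStepA_eq, List.map_cons, List.map_nil,
      Prod.mk.injEq]
    refine ⟨by rw [List.append_assoc], by ring⟩

-- A's outer loop: m frames, starting with counter t
theorem pv_outer_fold (per : Int) (m : Nat) :
    ∀ (acc : List (List (String × Int))) (t : Int),
      (PySem.List.pyRange 0 (m : Int) 1).foldl
        (fun st f => (PySem.List.pyRange 0 per 1).foldl (pvStepA f) st) (acc, t)
      = (acc ++ (PySem.List.pyRange 0 (m : Int) 1).flatMap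
            (fun f => (PySem.List.pyRange 0 per 1).map (fun o => pvEvA f o (t + (f * per + o) * 100))),
         t + m * (per.toNat * 100)) := by
  induction m with
  | zero => intro acc t; simp [PySem.List.pyRange_one_eq_nil]
  | succ m ih =>
    intro acc t
    rw [show ((m + 1 : Nat) : Int) = (m : Int) + 1 by push_cast; ring,
        PySem.List.pyRange_one_succ_right (Int.natCast_nonneg m)]
    rw [List.foldl_append, ih]
    by_cases hper : per ≤ 0
    · simp [PySem.List.pyRange_one_eq_nil hper]
      omega
    · obtain ⟨p, rfl⟩ : ∃ p : Nat, per = (p : Int) :=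
        ⟨per.toNat, (Int.toNat_of_nonneg (by omega)).symm⟩
      simp only [List.foldl_cons, List.foldl_nil, List.flatMap_append, List.flatMap_cons,
        List.flatMap_nil, List.append_nil, pv_inner_fold, Int.toNat_natCast, Prod.mk.injEq]
      refine ⟨?_, by ring⟩
      rw [List.append_assoc]
      congr 1
      congr 1
      apply List.map_congr_left
      intro o _
      congr 1
      ring

-- B's initial positions are the frame-0 positions
theorem pvPos0_eq (o : Int) : pvPos0 o = pvPosAt 0 o := by
  simp [pvPos0, pvPosAt]

-- advancing a frame-f position gives the frame-(f+1) position
theorem pvAdvance_posAt (f o : Int) : pvAdvance (pvPosAt f o) = pvPosAt (f + 1) o := by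
  have h1 : ∀ a : Int, PySem.Int.mod a 1280 = a % 1280 :=
    fun a => PySem.Int.mod_eq_emod_of_pos (by norm_num)
  have h2 : ∀ a : Int, PySem.Int.mod a 720 = a % 720 :=
    fun a => PySem.Int.mod_eq_emod_of_pos (by norm_num)
  unfold pvAdvance pvPosAt
  simp only [h1, h2, Prod.mk.injEq]
  constructor <;> omega

-- emitting from a frame-f position is A's event with that timestamp
theorem pvEmitB_eq (f o : Int) (ev : List (List (String × Int))) :
    pvEmitB f ev (pvPosAt f o) = ev ++ [pvEvA f o ((ev.length : Int) * 100)] := rfl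

-- B's inner loop: emit one event per position, timestamps from the running length
theorem pv_inner_B (f : Int) (n : Nat) :
    ∀ acc : List (List (String × Int)),
      ((PySem.List.pyRange 0 (n : Int) 1).map (pvPosAt f)).foldl (pvEmitB f) acc
        = acc ++ (PySem.List.pyRange 0 (n : Int) 1).map
            (fun o => pvEvA f o (((acc.length : Int) + o) * 100)) := by
  induction n with
  | zero => intro acc; simp [PySem.List.pyRange_one_eq_nil]
  | succ n ih =>
    intro acc
    rw [show ((n + 1 : Nat) : Int) = (n : Int) + 1 by push_cast; ring,
        PySem.List.pyRange_one_succ_right (Int.natCast_nonneg n)]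
    rw [List.map_append, List.foldl_append, ih, List.map_append]
    simp only [List.map_cons, List.map_nil, List.foldl_cons, List.foldl_nil, pvEmitB_eq]
    rw [List.append_assoc]
    congr 2
    have hlen : ((acc ++ (PySem.List.pyRange 0 (n : Int) 1).map
        (fun o => pvEvA f o (((acc.length : Int) + o) * 100))).length : Int)
        = (acc.length : Int) + n := by
      simp [PySem.List.length_pyRange_one]
    rw [hlen]

-- B's outer loop: after m frames the state holds the frame-m positions and the
-- events are exactly A's, frame-major, with count-derived timestamps
theorem pv_outer_B (p : Nat) (m : Nat) :
    ∀ acc : List (List (String × Int)),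
      (PySem.List.pyRange 0 (m : Int) 1).foldl pvStepB
          (acc, (PySem.List.pyRange 0 (p : Int) 1).map (pvPosAt 0))
        = (acc ++ (PySem.List.pyRange 0 (m : Int) 1).flatMap
              (fun f => (PySem.List.pyRange 0 (p : Int) 1).map
                (fun o => pvEvA f o (((acc.length : Int) + f * p + o) * 100))),
           (PySem.List.pyRange 0 (p : Int) 1).map (pvPosAt (m : Int))) := by
  induction m with
  | zero => intro acc; simp [PySem.List.pyRange_one_eq_nil]
  | succ m ih =>
    intro acc
    rw [show ((m + 1 : Nat) : Int) = (m : Int) + 1 by push_cast; ring,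
        PySem.List.pyRange_one_succ_right (Int.natCast_nonneg m)]
    rw [List.foldl_append, ih]
    simp only [List.foldl_cons, List.foldl_nil, pvStepB]
    have hstate : ((PySem.List.pyRange 0 (p : Int) 1).map (pvPosAt (m : Int))).map pvAdvance
        = (PySem.List.pyRange 0 (p : Int) 1).map (pvPosAt ((m : Int) + 1)) := by
      rw [List.map_map]
      apply List.map_congr_left
      intro o _
      simp only [Function.comp_apply, pvAdvance_posAt]
    have hlen : (((acc ++ (PySem.List.pyRange 0 (m : Int) 1).flatMap
        (fun f => (PySem.List.pyRange 0 (p : Int) 1).map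
          (fun o => pvEvA f o (((acc.length : Int) + f * p + o) * 100)))).length : Int))
        = (acc.length : Int) + m * p := by
      simp only [List.length_append, List.length_flatMap, List.length_map,
        PySem.List.length_pyRange_one]
      rw [List.map_const']
      simp only [List.sum_replicate, smul_eq_mul, PySem.List.length_pyRange_one,
        sub_zero, Int.toNat_natCast]
      push_cast
      ring
    rw [pv_inner_B ((m : Nat) : Int) p, hstate]
    refine Prod.ext ?_ rfl
    simp only [List.flatMap_append, List.flatMap_cons, List.flatMap_nil, List.append_nil]
    rw [List.append_assoc]
    congr 1
    congr 1
    apply List.map_congr_left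
    intro o _
    congr 1
    rw [hlen]

-- slice of the empty list
theorem pv_slice_nil (b : Int) : PySem.List.slice ([] : List (List (String × Int))) none (some b) = [] := by
  simp [PySem.List.slice]

-- ===== VERDICT (by name: the statement is the Claim_ definition above) =====
theorem create_synthetic_prophesee_data_spec : Claim_equal_create_synthetic_prophesee_data := by
  intro num_events _
  unfold Spec_create_synthetic_prophesee_data create_synthetic_prophesee_data
    create_synthetic_prophesee_data_alt
  set per := PySem.Int.floordiv num_events 100 with hper
  by_cases h : per ≤ 0
  · -- per ≤ 0: no objects, no event is ever appended on either side
    simp only [PySem.List.pyRange_one_eq_nil h, List.foldl_nil, List.map_nil]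
    have hA : ((PySem.List.pyRange 0 100 1).foldl
        (fun (st : List (List (String × Int)) × Int) (_ : Int) => st)
        (([] : List (List (String × Int))), (0 : Int)))
        = (([] : List (List (String × Int))), (0 : Int)) := List.foldl_fixed _
    have hB : ((PySem.List.pyRange 0 100 1).foldl pvStepB
        (([] : List (List (String × Int))), ([] : List (Int × Int))))
        = (([] : List (List (String × Int))), ([] : List (Int × Int))) := by
      have hstep : ∀ f, pvStepB ([], []) f = ([], []) := fun f => rfl
      exact List.foldl_fixed' hstep _
    rw [hA, hB]
    exact pv_slice_nil num_events
  · replace h : 0 < per := by omega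
    obtain ⟨p, hp⟩ : ∃ p : Nat, per = (p : Int) :=
      ⟨per.toNat, (Int.toNat_of_nonneg h.le).symm⟩
    rw [hp]
    have hinit : (PySem.List.pyRange 0 (p : Int) 1).map pvPos0
        = (PySem.List.pyRange 0 (p : Int) 1).map (pvPosAt 0) :=
      List.map_congr_left (fun o _ => pvPos0_eq o)
    have h100 : (100 : Int) = ((100 : Nat) : Int) := rfl
    rw [hinit, h100, pv_outer_fold, pv_outer_B]
    simp only [List.nil_append, List.length_nil, Nat.cast_zero, zero_add]
    -- the final slice [:num_events] keeps the whole list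
    have hbound : per * 100 + PySem.Int.mod num_events 100 = num_events :=
      PySem.Int.floordiv_mul_add_mod num_events 100
    have hm0 : 0 ≤ PySem.Int.mod num_events 100 :=
      PySem.Int.mod_nonneg num_events (by norm_num)
    have hlen : ((PySem.List.pyRange 0 ((100 : Nat) : Int) 1).flatMap
          (fun f => (PySem.List.pyRange 0 (p : Int) 1).map
            (fun o => pvEvA f o ((f * (p : Int) + o) * 100)))).length
        ≤ num_events.toNat := by
      simp only [List.length_flatMap, List.length_map, PySem.List.length_pyRange_one]
      rw [List.map_const']
      simp only [List.sum_replicate, smul_eq_mul, PySem.List.length_pyRange_one,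
        sub_zero, Int.toNat_natCast]
      omega
    rw [PySem.List.slice_to _ (by omega : (0:Int) ≤ num_events)]
    exact List.take_of_length_le hlen
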